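-- pv_equiv track=rewrite | github.com/JakubFr4czek/Concurrent-Gauss-Elimination | tools.py | diekert_graph
-- ===== SOURCE A (Python) =====
-- def diekert_graph(alphabet, D):
--     '''
--     Funkcja zapisująca relację zależności jako graf
--     w postaci listy sąsiedztwa.
--     '''
--
--     # Przypisuję wszystkim symbolom unikalne numery
--     symbol_id = {}
--
--     for i, symbol in enumerate(alphabet):
--         symbol_id.update({symbol : i})
--
--     # Tworzę graf G = (V, E)
--     G = [[] for _ in range(len(alphabet))]
--
--     # Dodaję relacje zależności do grafu G,
--     # Należy pamiętać, że G jest skierowany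
--     # zatem s2 jest zależne od s1
--     for s1, s2 in D:
--         s1_id = symbol_id[s1]
--         s2_id = symbol_id[s2]
--
--         G[s1_id].append(s2_id)
--
--     return G
-- ===== SOURCE B (Python) =====
-- def diekert_graph(alphabet, D):
--     '''
--     Dependency relation as a directed adjacency-list graph, built by a
--     per-vertex gather instead of A's single scatter pass.
--     '''
--     symbol_id = {s: i for i, s in enumerate(alphabet)}
--     return [[symbol_id[s2] for (s1, s2) in D if symbol_id[s1] == i]
--             for i in range(len(alphabet))]
-- ===== Notes on version B (the rewrite author's own statement) =====
-- stated objective: alternative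
-- what changed: Replaces A's single scatter pass that appends each edge into G[symbol_id[s1]] with a per-vertex gather: for each vertex index i, filter D for edges whose source id is i, inverting the control flow.
import Mathlib
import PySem

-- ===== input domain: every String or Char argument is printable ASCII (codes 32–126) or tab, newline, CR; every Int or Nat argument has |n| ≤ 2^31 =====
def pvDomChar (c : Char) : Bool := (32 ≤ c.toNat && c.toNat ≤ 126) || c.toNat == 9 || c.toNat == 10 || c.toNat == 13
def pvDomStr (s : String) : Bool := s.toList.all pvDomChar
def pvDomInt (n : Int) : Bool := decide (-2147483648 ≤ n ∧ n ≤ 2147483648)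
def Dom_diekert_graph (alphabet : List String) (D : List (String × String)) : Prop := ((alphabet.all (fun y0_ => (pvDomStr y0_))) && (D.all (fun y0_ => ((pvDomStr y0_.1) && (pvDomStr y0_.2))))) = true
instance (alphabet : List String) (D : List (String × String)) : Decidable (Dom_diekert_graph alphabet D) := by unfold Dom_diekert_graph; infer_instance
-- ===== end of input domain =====

-- B builds the same graph by a per-vertex gather (filter D per source index) instead of A's
-- single scatter pass; equivalence of the return values is proved on inputs where every symbol
-- of D occurs in alphabet (elsewhere both Pythons raise KeyError).

-- ===== PORT A =====
-- shared helper: both Pythons build the identical dict {symbol: index} (last index wins)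
def buildSymbolId (alphabet : List String) : PySem.Dict String Int :=
  (PySem.List.enumerate alphabet).foldl (fun d p => d.insert p.2 p.1) PySem.Dict.empty

def diekert_graph (alphabet : List String) (D : List (String × String)) : List (List Int) :=
  let symbol_id := buildSymbolId alphabet
  let G : List (List Int) := List.replicate alphabet.length []
  D.foldl (fun G p =>
    match symbol_id.get? p.1, symbol_id.get? p.2 with
    | some i1, some i2 => G.modify i1.toNat (fun l => l ++ [i2])
    | _, _ => G) G   -- 'none' = Python KeyError, excluded by Pre_

-- ===== PORT B =====
def diekert_graph_alt (alphabet : List String) (D : List (String × String)) : List (List Int) :=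
  let symbol_id := buildSymbolId alphabet
  (List.range alphabet.length).map (fun i : Nat =>
    (D.filter (fun p => symbol_id.getD p.1 (-1) == (i : Int))).map
      (fun p => symbol_id.getD p.2 (-1)))   -- getD (-1): KeyError case, excluded by Pre_

-- ===== PRECONDITION & SPEC =====
-- Pre_ excludes exactly the inputs where a pair of D mentions a symbol outside alphabet:
-- there both Pythons raise KeyError.
def Pre_diekert_graph (alphabet : List String) (D : List (String × String)) : Prop :=
  ∀ p ∈ D, p.1 ∈ alphabet ∧ p.2 ∈ alphabet
instance (alphabet : List String) (D : List (String × String)) : Decidable (Pre_diekert_graph alphabet D) := by unfold Pre_diekert_graph; infer_instance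

def pvWitness_diekert_graph : List String × (List (String × String)) :=
  (["a", "b", "c"], [("a", "b"), ("b", "c"), ("a", "a")])

def Spec_diekert_graph (alphabet : List String) (D : List (String × String)) (out : List (List Int)) : Prop := out = diekert_graph_alt alphabet D
instance (alphabet : List String) (D : List (String × String)) (out : List (List Int)) : Decidable (Spec_diekert_graph alphabet D out) := by unfold Spec_diekert_graph; infer_instance

-- ===== CLAIM (what is proved, stated in full; the proofs are below) =====
def Claim_equal_diekert_graph : Prop := ∀ (alphabet : List String) (D : List (String × String)), Dom_diekert_graph alphabet D → Pre_diekert_graph alphabet D → Spec_diekert_graph alphabet D (diekert_graph alphabet D)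

-- ===== LEMMAS AND PROOFS =====

-- appending one element to the alphabet inserts its index into the dict
theorem buildSymbolId_append (xs : List String) (x : String) :
    buildSymbolId (xs ++ [x]) = (buildSymbolId xs).insert x (xs.length : Int) := by
  simp [buildSymbolId, PySem.List.enumerate_append, PySem.List.enumerate_cons]

-- every symbol of the alphabet has an id, a Nat below the alphabet's length
theorem buildSymbolId_mem (alphabet : List String) (s : String) (hs : s ∈ alphabet) :
    ∃ k : Nat, k < alphabet.length ∧ (buildSymbolId alphabet).get? s = some (k : Int) := by
  induction alphabet using List.reverseRecOn with
  | nil => simp at hs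
  | append_singleton xs x ih =>
    rw [buildSymbolId_append]
    by_cases hx : s = x
    · subst hx
      exact ⟨xs.length, by simp, by rw [PySem.Dict.get?_insert_self]⟩
    · rcases List.mem_append.mp hs with h | h
      · obtain ⟨k, hk, hget⟩ := ih h
        exact ⟨k, by simp; omega, by rw [PySem.Dict.get?_insert_of_ne _ _ hx, hget]⟩
      · simp [hx] at h

-- scatter fold over D = pointwise gather, for any start graph of the right length
theorem scatter_eq_gather (sid : PySem.Dict String Int) (D : List (String × String))
    (hD : ∀ p ∈ D, (∃ k1 : Nat, k1 < n ∧ sid.get? p.1 = some (k1 : Int)) ∧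
                   (∃ k2 : Int, sid.get? p.2 = some k2))
    (G : List (List Int)) (hG : G.length = n) :
    D.foldl (fun G p =>
      match sid.get? p.1, sid.get? p.2 with
      | some i1, some i2 => G.modify i1.toNat (fun l => l ++ [i2])
      | _, _ => G) G
    = (List.range n).map (fun i =>
        G.getD i [] ++ (D.filter (fun p => sid.getD p.1 (-1) == (i : Int))).map
          (fun p => sid.getD p.2 (-1))) := by
  induction D generalizing G with
  | nil =>
    subst hG
    simp only [List.foldl_nil, List.filter_nil, List.map_nil, List.append_nil]
    exact (List.ext_getElem (by simp) (by intro i h1 h2; simp [List.getD_eq_getElem?_getD,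
      List.getElem?_eq_getElem (by simpa using h2)])).symm
  | cons p rest ih =>
    obtain ⟨⟨k1, hk1, hg1⟩, ⟨k2, hg2⟩⟩ := hD p (List.mem_cons_self)
    simp only [List.foldl_cons, hg1, hg2]
    rw [ih (fun q hq => hD q (List.mem_cons_of_mem _ hq)) _ (by simp [hG])]
    apply List.map_congr_left
    intro i hi
    rw [List.mem_range] at hi
    have hd1 : sid.getD p.1 (-1) = (k1 : Int) := PySem.Dict.getD_of_get?_eq_some _ _ hg1
    have hd2 : sid.getD p.2 (-1) = k2 := PySem.Dict.getD_of_get?_eq_some _ _ hg2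
    by_cases hik : i = k1
    · subst hik
      have hmod : (G.modify ((i : Int)).toNat (fun l => l ++ [k2])).getD i []
          = G.getD i [] ++ [k2] := by
        simp [List.getD_eq_getElem?_getD,
          List.getElem?_eq_getElem (show i < G.length by omega)]
      rw [hmod, List.filter_cons_of_pos (by simp [hd1]), List.map_cons, hd2,
        List.append_assoc]
      rfl
    · have hmod : (G.modify ((k1 : Int)).toNat (fun l => l ++ [k2])).getD i []
          = G.getD i [] := by
        simp only [List.getD_eq_getElem?_getD, List.getElem?_modify, Int.toNat_natCast]
        cases G[i]? <;> simp [if_neg (fun h : k1 = i => hik h.symm)]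
      rw [hmod, List.filter_cons_of_neg (by simp [hd1]; omega)]

-- ===== VERDICT (by name: the statement is the Claim_ definition above) =====
theorem diekert_graph_spec : Claim_equal_diekert_graph := by
  intro alphabet D _ hpre
  unfold Spec_diekert_graph diekert_graph diekert_graph_alt
  rw [scatter_eq_gather (buildSymbolId alphabet) D
    (fun p hp => ⟨buildSymbolId_mem alphabet p.1 (hpre p hp).1,
      by obtain ⟨k, _, h⟩ := buildSymbolId_mem alphabet p.2 (hpre p hp).2; exact ⟨k, h⟩⟩)
    _ (by simp)]
  apply List.map_congr_left
  intro i hi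
  simp [List.getD_eq_getElem?_getD, List.mem_range.mp hi]
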